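-- pv_equiv track=rewrite | github.com/iconluxurygroup/service-distro-image-scraper | app/icon_image_lib/google_parser.py | clean_source_url
-- ===== SOURCE A (Python) =====
-- def clean_source_url(s): # Your existing function
--     """Clean and decode URL string by replacing encoded characters."""
--     if not isinstance(s, str): # robustness
--         return s
--     simplified_str = s.replace('\\\\', '') # Consider if this is always correct or if `codecs.decode(s, 'unicode_escape')` might be better for some inputs
--     replacements = {
--         'u0026': '&', 'u003d': '=', 'u003f': '?', 'u0020': ' ', 'u0025': '%', 'u002b': '+', 'u003c': '<',
--         'u003e': '>', 'u0023': '#', 'u0024': '$', 'u002f': '/', 'u005c': '\\', 'u007c': '|', 'u002d': '-',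
--         'u003a': ':', 'u003b': ';', 'u002c': ',', 'u002e': '.', 'u0021': '!', 'u0040': '@', 'u005e': '^',
--         'u0060': '`', 'u007b': '{', 'u007d': '}', 'u005b': '[', 'u005d': ']', 'u002a': '*', 'u0028': '(',
--         'u0029': ')'
--     }
--     for encoded, decoded in replacements.items():
--         simplified_str = simplified_str.replace(encoded, decoded)
--     return simplified_str
-- ===== SOURCE B (Python) =====
-- HEX = "0123456789abcdef"
-- DECODED = "&=? %+<>#$/\\|-:;,.!@^`{}[]*()"
--
-- def _decode_window(w):
--     """If w is a 5-char token 'u00' + two lowercase hex digits whose code is one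
--     of the decoded punctuation characters, return that character, else None."""
--     if len(w) == 5 and w[0] == 'u' and w[1] == '0' and w[2] == '0' \
--             and w[3] in HEX and w[4] in HEX:
--         c = chr(16 * HEX.index(w[3]) + HEX.index(w[4]))
--         if c in DECODED:
--             return c
--     return None
--
-- def clean_source_url(s):
--     """Clean and decode URL string by replacing encoded characters."""
--     if not isinstance(s, str):
--         return s
--     t = s.replace('\\\\', '')
--     out = []
--     i = 0
--     while i < len(t):
--         c = _decode_window(t[i:i + 5])
--         if c is not None:
--             out.append(c)
--             i += 5
--         else:
--             out.append(t[i])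
--             i += 1
--     return ''.join(out)
-- ===== Notes on version B (the rewrite author's own statement) =====
-- stated objective: alternative
-- what changed: A decodes by 29 sequential whole-string .replace passes, one per escape token from a dict; B keeps the backslash-pair removal and then does a single left-to-right scan that decodes each 5-character window arithmetically -- a shape check (letter u, two zeros, two lowercase hex digits), chr(16*i+j), kept only if that character is one of the 29 decoded punctuation characters -- with no token table at all.
import Mathlib
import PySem

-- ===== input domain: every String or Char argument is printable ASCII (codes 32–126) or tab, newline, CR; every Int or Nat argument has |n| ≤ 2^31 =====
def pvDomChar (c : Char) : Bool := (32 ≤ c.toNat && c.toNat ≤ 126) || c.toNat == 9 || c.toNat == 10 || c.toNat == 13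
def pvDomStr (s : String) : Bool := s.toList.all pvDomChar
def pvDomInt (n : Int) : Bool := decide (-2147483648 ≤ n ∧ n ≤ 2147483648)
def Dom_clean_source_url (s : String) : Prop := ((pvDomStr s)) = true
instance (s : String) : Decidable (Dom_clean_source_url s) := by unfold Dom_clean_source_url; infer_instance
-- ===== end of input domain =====

-- B replaces A's 29 sequential whole-string `.replace` passes (one per escape token from a dict) by a
-- single left-to-right scan that decodes each 5-char window arithmetically ('u00' + two lowercase hex
-- digits → the character with that code, kept only if it is one of the 29 decoded punctuation chars);
-- no token table at all. Same return value; alternative algorithm.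

-- ===== PORT A =====
-- the dict literal `replacements` (insertion order), iterated by the for-loop over .items()
def replacements : PySem.Dict String String := PySem.Dict.mk
  [("u0026", "&"), ("u003d", "="), ("u003f", "?"), ("u0020", " "), ("u0025", "%"), ("u002b", "+"),
   ("u003c", "<"), ("u003e", ">"), ("u0023", "#"), ("u0024", "$"), ("u002f", "/"), ("u005c", "\\"),
   ("u007c", "|"), ("u002d", "-"), ("u003a", ":"), ("u003b", ";"), ("u002c", ","), ("u002e", "."),
   ("u0021", "!"), ("u0040", "@"), ("u005e", "^"), ("u0060", "`"), ("u007b", "{"), ("u007d", "}"),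
   ("u005b", "["), ("u005d", "]"), ("u002a", "*"), ("u0028", "("), ("u0029", ")")]

-- the `isinstance(s, str)` guard always holds here (the parameter is a String)
def clean_source_url (s : String) : String :=
  let simplified_str := PySem.Str.replace s "\\\\" ""
  replacements.items.foldl (fun acc p => PySem.Str.replace acc p.1 p.2) simplified_str

-- ===== PORT B =====
-- Source B's HEX and DECODED strings, as char lists
def pvHexL : List Char := ['0','1','2','3','4','5','6','7','8','9','a','b','c','d','e','f']
def pvDecodedL : List Char :=
  ['&','=','?',' ','%','+','<','>','#','$','/','\\','|','-',':',';',',','.','!','@','^','`','{','}','[',']','*','(',')']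

-- Source B's _decode_window: shape check 'u','0','0',hex,hex on the 5-char window, then chr(16*i+j)
def pvDec (w : List Char) : Option Char :=
  match w with
  | ['u', '0', '0', h1, h2] =>
    if h1 ∈ pvHexL ∧ h2 ∈ pvHexL then
      let c := Char.ofNat (16 * pvHexL.idxOf h1 + pvHexL.idxOf h2)
      if c ∈ pvDecodedL then some c else none
    else none
  | _ => none

-- Source B's while-loop: decode the window t[i:i+5]; on a hit emit the char and jump 5, else copy one char
def pvScanB : List Char → List Char
  | [] => []
  | c :: rest =>
    match pvDec (List.take 5 (c :: rest)) with
    | some d => d :: pvScanB (rest.drop 4)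
    | none => c :: pvScanB rest
termination_by cs => cs.length
decreasing_by
  · simp [List.length_drop]
  · simp

def clean_source_url_alt (s : String) : String :=
  let t := PySem.Str.replace s "\\\\" ""
  String.ofList (pvScanB t.toList)

-- ===== PRECONDITION & SPEC =====
def Spec_clean_source_url (s : String) (out : String) : Prop := out = clean_source_url_alt s
instance (s : String) (out : String) : Decidable (Spec_clean_source_url s out) := by unfold Spec_clean_source_url; infer_instance

-- ===== CLAIM (what is proved, stated in full; the proofs are below) =====
def Claim_equal_clean_source_url : Prop := ∀ (s : String), Dom_clean_source_url s → Spec_clean_source_url s (clean_source_url s)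

-- ===== LEMMAS AND PROOFS =====

-- A's (token, replacement) pairs as char lists, in dict order (proof-only mirror of `replacements`)
def pvToks : List (List Char × List Char) :=
  [("u0026".toList, "&".toList), ("u003d".toList, "=".toList), ("u003f".toList, "?".toList),
   ("u0020".toList, " ".toList), ("u0025".toList, "%".toList), ("u002b".toList, "+".toList),
   ("u003c".toList, "<".toList), ("u003e".toList, ">".toList), ("u0023".toList, "#".toList),
   ("u0024".toList, "$".toList), ("u002f".toList, "/".toList), ("u005c".toList, "\\".toList),
   ("u007c".toList, "|".toList), ("u002d".toList, "-".toList), ("u003a".toList, ":".toList),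
   ("u003b".toList, ";".toList), ("u002c".toList, ",".toList), ("u002e".toList, ".".toList),
   ("u0021".toList, "!".toList), ("u0040".toList, "@".toList), ("u005e".toList, "^".toList),
   ("u0060".toList, "`".toList), ("u007b".toList, "{".toList), ("u007d".toList, "}".toList),
   ("u005b".toList, "[".toList), ("u005d".toList, "]".toList), ("u002a".toList, "*".toList),
   ("u0028".toList, "(".toList), ("u0029".toList, ")".toList)]

-- shape facts about the table: tokens have length 5, replacements length 1
set_option maxRecDepth 4096 in
lemma pvFact_len1 : ∀ p ∈ pvToks, p.1.length = 5 := by decide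

set_option maxRecDepth 4096 in
lemma pvFact_len2 : ∀ p ∈ pvToks, p.2.length = 1 := by decide

-- every token starts with 'u', and no token has 'u' at positions 1..4 (so tokens never overlap)
set_option maxRecDepth 4096 in
lemma pvFact_head0 : ∀ p ∈ pvToks, p.1[0]? = some 'u' := by decide

set_option maxRecDepth 4096 in
lemma pvFact_headi : ∀ p ∈ pvToks, ∀ i < 5, 1 ≤ i → p.1[i]? ≠ some 'u' := by decide

-- the alphabet tokens are written in; no replacement character lies in it (replacements are inert)
def pvTokChars : List Char := ['u','0','1','2','3','4','5','6','7','8','9','a','b','c','d','e','f']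

lemma pvFact_tokChars : ∀ q ∈ pvToks, ∀ c ∈ q.1, c ∈ pvTokChars := by
  have h : (pvToks.all fun q => q.1.all (fun c => decide (c ∈ pvTokChars))) = true := by decide
  simp only [List.all_eq_true, decide_eq_true_eq] at h
  exact h

lemma pvFact_valChars : ∀ p ∈ pvToks, ∀ c ∈ p.2, c ∉ pvTokChars := by
  have h : (pvToks.all fun p => p.2.all (fun c => !decide (c ∈ pvTokChars))) = true := by decide
  simp only [List.all_eq_true, Bool.not_eq_true', decide_eq_false_iff_not] at h
  exact h

-- no replacement character occurs in any token
lemma pvFact_val : ∀ p ∈ pvToks, ∀ q ∈ pvToks, ∀ c ∈ p.2, c ∉ q.1 :=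
  fun p hp q hq c hc hcq => pvFact_valChars p hp c hc (pvFact_tokChars q hq c hcq)

-- ---- unfolding lemmas for PySem.Chars.replace (old ≠ []) ----

lemma pvGo_zero (old new l acc : List Char) :
    PySem.Chars.replace.go old new 0 l acc = acc.reverse ++ l := by
  rw [PySem.Chars.replace.go]

lemma pvGo_nil (old new acc : List Char) (n : Nat) :
    PySem.Chars.replace.go old new (n + 1) [] acc = acc.reverse := by
  rw [PySem.Chars.replace.go]
  simp

lemma pvGo_step (old new acc : List Char) (n : Nat) (c : Char) (t : List Char) :
    PySem.Chars.replace.go old new (n + 1) (c :: t) acc =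
      if old.isPrefixOf (c :: t) then
        PySem.Chars.replace.go old new n (List.drop old.length (c :: t)) (new.reverse ++ acc)
      else PySem.Chars.replace.go old new n t (c :: acc) := by
  rw [PySem.Chars.replace.go]

lemma pvReplace_nil (old new : List Char) (hold : old ≠ []) :
    PySem.Chars.replace [] old new = [] := by
  rw [PySem.Chars.replace]
  simp [List.isEmpty_iff, hold, pvGo_zero]

lemma pvReplace_cons_def (old new : List Char) (c : Char) (t : List Char) (hold : old ≠ []) :
    PySem.Chars.replace (c :: t) old new =
      PySem.Chars.replace.go old new (t.length + 1) (c :: t) [] := by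
  rw [PySem.Chars.replace]
  simp [List.isEmpty_iff, hold]

lemma pvGo_spec (old new : List Char) (hold : old ≠ []) :
    ∀ fuel l acc, l.length ≤ fuel →
      PySem.Chars.replace.go old new fuel l acc = acc.reverse ++ PySem.Chars.replace l old new := by
  have hop : 1 ≤ old.length := by
    cases old with
    | nil => exact absurd rfl hold
    | cons a o => simp
  intro fuel
  induction fuel using Nat.strong_induction_on with
  | _ fuel ih =>
    intro l acc hlen
    match fuel, l with
    | 0, l =>
      have hl : l = [] := by cases l <;> simp_all
      subst hl
      rw [pvGo_zero, pvReplace_nil old new hold]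
    | (n+1), [] =>
      rw [pvGo_nil, pvReplace_nil old new hold, List.append_nil]
    | (n+1), (c :: t) =>
      have hlt : t.length ≤ n := by simpa using hlen
      have hdrop : (List.drop old.length (c :: t)).length ≤ t.length := by
        simp only [List.length_drop, List.length_cons]; omega
      rw [pvGo_step, pvReplace_cons_def old new c t hold, pvGo_step]
      by_cases hp : old.isPrefixOf (c :: t) = true
      · rw [if_pos hp, if_pos hp]
        rw [ih n (by omega) _ _ (le_trans hdrop hlt),
          ih t.length (by omega) _ _ hdrop]
        simp
      · rw [if_neg (by simp [hp]), if_neg (by simp [hp])]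
        rw [ih n (by omega) t (c :: acc) hlt,
          ih t.length (by omega) t [c] le_rfl]
        simp

lemma pvReplace_pos (old new l : List Char) (hold : old ≠ []) (hp : old.isPrefixOf l = true) :
    PySem.Chars.replace l old new = new ++ PySem.Chars.replace (l.drop old.length) old new := by
  cases l with
  | nil =>
    rw [List.isPrefixOf_iff_prefix] at hp
    exact absurd (List.prefix_nil.mp hp) hold
  | cons c t =>
    have hdrop : (List.drop old.length (c :: t)).length ≤ t.length := by
      have : 1 ≤ old.length := by
        cases old with
        | nil => exact absurd rfl hold
        | cons a o => simp
      simp only [List.length_drop, List.length_cons]; omega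
    rw [pvReplace_cons_def old new c t hold, pvGo_step, if_pos hp,
      pvGo_spec old new hold t.length _ _ hdrop]
    simp

lemma pvReplace_neg (old new : List Char) (c : Char) (t : List Char) (hold : old ≠ [])
    (hp : old.isPrefixOf (c :: t) = false) :
    PySem.Chars.replace (c :: t) old new = c :: PySem.Chars.replace t old new := by
  rw [pvReplace_cons_def old new c t hold, pvGo_step, if_neg (by simp [hp]),
    pvGo_spec old new hold t.length t [c] le_rfl]
  simp

lemma pvReplace_skip (old new : List Char) (hold : old ≠ []) :
    ∀ (k : Nat) (l : List Char), (∀ i < k, old.isPrefixOf (l.drop i) = false) →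
      PySem.Chars.replace l old new = l.take k ++ PySem.Chars.replace (l.drop k) old new := by
  intro k
  induction k with
  | zero => simp
  | succ k ih =>
    intro l h
    cases l with
    | nil => simp [pvReplace_nil old new hold]
    | cons c t =>
      rw [pvReplace_neg old new c t hold (h 0 (by omega))]
      rw [ih t (fun i hi => by
        have := h (i + 1) (by omega)
        simpa using this)]
      simp

lemma pvReplace_at (old new : List Char) (hold : old ≠ []) (i : Nat) (l : List Char)
    (h1 : ∀ j < i, old.isPrefixOf (l.drop j) = false) (h2 : old.isPrefixOf (l.drop i) = true) :
    PySem.Chars.replace l old new =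
      l.take i ++ new ++ PySem.Chars.replace (l.drop (i + old.length)) old new := by
  rw [pvReplace_skip old new hold i l h1, pvReplace_pos old new _ hold h2,
    List.drop_drop]
  simp [List.append_assoc]

-- ---- the generic one-pass scanner over a table T, and its unfolding lemmas ----

def pvScanT (T : List (List Char × List Char)) : List Char → List Char
  | [] => []
  | c :: rest =>
    match T.find? (fun p => p.1.isPrefixOf (c :: rest)) with
    | some p => p.2 ++ pvScanT T (rest.drop (p.1.length - 1))
    | none => c :: pvScanT T rest
termination_by cs => cs.length
decreasing_by
  · simp [List.length_drop]
  · simp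

lemma pvScanT_nil (T : List (List Char × List Char)) : pvScanT T [] = [] := by
  rw [pvScanT]

lemma pvScanT_cons_some (T : List (List Char × List Char)) (c : Char) (rest t d : List Char)
    (h : T.find? (fun p => p.1.isPrefixOf (c :: rest)) = some (t, d)) :
    pvScanT T (c :: rest) = d ++ pvScanT T (rest.drop (t.length - 1)) := by
  rw [pvScanT, h]

lemma pvScanT_cons_none (T : List (List Char × List Char)) (c : Char) (rest : List Char)
    (h : T.find? (fun p => p.1.isPrefixOf (c :: rest)) = none) :
    pvScanT T (c :: rest) = c :: pvScanT T rest := by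
  rw [pvScanT, h]

lemma pvScanT_empty : ∀ cs, pvScanT [] cs = cs := by
  intro cs
  induction cs with
  | nil => exact pvScanT_nil []
  | cons c rest ih => rw [pvScanT_cons_none [] c rest rfl, ih]

-- ---- prefix helpers for length-5 keys ----

lemma pvPrefix5_iff (k l : List Char) (hk : k.length = 5) :
    k.isPrefixOf l = true ↔ k = l.take 5 := by
  rw [List.isPrefixOf_iff_prefix, List.prefix_iff_eq_take, hk]

lemma pvPrefix_getElem (k l : List Char) (hk : k.length = 5) (h : k.isPrefixOf l = true)
    (m : Nat) (hm : m < 5) : k[m]? = l[m]? := by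
  rw [(pvPrefix5_iff k l hk).mp h, List.getElem?_take, if_pos hm]

lemma pvFind_congr {α β : Type} (L : List (α × β)) (p q : α × β → Bool)
    (h : ∀ x ∈ L, p x = q x) : L.find? p = L.find? q := by
  induction L with
  | nil => rfl
  | cons a l ih =>
    by_cases hq : q a = true
    · rw [List.find?_cons_of_pos (by rw [h a (by simp)]; exact hq),
        List.find?_cons_of_pos hq]
    · rw [List.find?_cons_of_neg (by rw [h a (by simp)]; exact hq),
        List.find?_cons_of_neg hq, ih (fun x hx => h x (by simp [hx]))]

-- ---- the core lemma: one more replace pass = one more table row for the scanner ----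

lemma pvKey (t d : List Char) (htd : (t, d) ∈ pvToks) (L : List (List Char × List Char))
    (hL : ∀ p ∈ L, p ∈ pvToks) :
    ∀ (n : Nat) (cs : List Char), cs.length ≤ n →
      pvScanT L (PySem.Chars.replace cs t d) = pvScanT ((t, d) :: L) cs := by
  have ht5 : t.length = 5 := pvFact_len1 _ htd
  have htne : t ≠ [] := by intro h; rw [h] at ht5; simp at ht5
  have hd1 : d.length = 1 := pvFact_len2 _ htd
  obtain ⟨d0, rfl⟩ := List.length_eq_one_iff.mp hd1
  have hd0 : ∀ q ∈ pvToks, d0 ∉ q.1 := fun q hq => pvFact_val _ htd q hq d0 (by simp)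
  intro n
  induction n with
  | zero =>
    intro cs h
    have : cs = [] := by cases cs <;> simp_all
    subst this
    rw [pvReplace_nil t [d0] htne, pvScanT_nil, pvScanT_nil]
  | succ n ih =>
    intro cs hcs
    cases cs with
    | nil => rw [pvReplace_nil t [d0] htne, pvScanT_nil, pvScanT_nil]
    | cons c rest =>
      have hlen : rest.length ≤ n := by simpa using hcs
      by_cases hp : t.isPrefixOf (c :: rest) = true
      · -- the token t itself matches at this position
        rw [pvReplace_pos t [d0] (c :: rest) htne hp, ht5,
          show List.drop 5 (c :: rest) = rest.drop 4 from rfl,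
          List.singleton_append]
        have hnone : L.find? (fun p => p.1.isPrefixOf
            (d0 :: PySem.Chars.replace (rest.drop 4) t [d0])) = none := by
          rw [List.find?_eq_none]
          intro q hq hcontra
          have hq5 : q.1.length = 5 := pvFact_len1 q (hL q hq)
          have h0 : q.1[0]? = (d0 :: PySem.Chars.replace (rest.drop 4) t [d0])[0]? :=
            pvPrefix_getElem q.1 _ hq5 hcontra 0 (by omega)
          exact hd0 q (hL q hq) (List.mem_of_getElem? (by rw [h0]; rfl))
        rw [pvScanT_cons_none L _ _ hnone,
          ih (rest.drop 4) (by simp only [List.length_drop]; omega)]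
        have hfr : ((t, [d0]) :: L).find? (fun p => p.1.isPrefixOf (c :: rest)) =
            some (t, [d0]) := by
          simp only [List.find?, hp]
        rw [pvScanT_cons_some ((t, [d0]) :: L) c rest t [d0] hfr, ht5]
        rfl
      · have hpf : t.isPrefixOf (c :: rest) = false := by
          rw [Bool.eq_false_iff]; exact hp
        cases hfind : L.find? (fun p => p.1.isPrefixOf (c :: rest)) with
        | some pr =>
          -- another token t' (from the rows already processed) matches here
          obtain ⟨t', d'⟩ := pr
          have ht'mem : (t', d') ∈ L := List.mem_of_find?_eq_some hfind
          have ht'5 : t'.length = 5 := pvFact_len1 _ (hL _ ht'mem)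
          have hpre : t'.isPrefixOf (c :: rest) = true := by
            have := List.find?_some hfind
            simpa using this
          have ht'eq : t' = (c :: rest).take 5 := (pvPrefix5_iff t' (c :: rest) ht'5).mp hpre
          have hr4 : 4 ≤ rest.length := by
            have hlen5 := congrArg List.length ht'eq
            simp [ht'5] at hlen5
            omega
          have hno : ∀ i < 5, t.isPrefixOf ((c :: rest).drop i) = false := by
            intro i hi
            rcases Nat.eq_zero_or_pos i with h0 | h1
            · subst h0; simpa using hpf
            · rw [Bool.eq_false_iff]
              intro hcp
              have hu : t[0]? = some 'u' := pvFact_head0 _ htd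
              have e1 : t[0]? = ((c :: rest).drop i)[0]? :=
                pvPrefix_getElem t _ ht5 hcp 0 (by omega)
              have e2 : ((c :: rest).drop i)[0]? = (c :: rest)[i]? := by
                rw [List.getElem?_drop]
                simp
              have e3 : (c :: rest)[i]? = t'[i]? := by
                rw [ht'eq, List.getElem?_take, if_pos hi]
              have : t'[i]? = some 'u' := by rw [← e3, ← e2, ← e1, hu]
              exact pvFact_headi _ (hL _ ht'mem) i hi h1 this
          have hrep : PySem.Chars.replace (c :: rest) t [d0] =
              t' ++ PySem.Chars.replace ((c :: rest).drop 5) t [d0] := by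
            rw [pvReplace_skip t [d0] htne 5 (c :: rest) hno, ← ht'eq]
          have hcong : L.find? (fun p => p.1.isPrefixOf
              (c :: (rest.take 4 ++ PySem.Chars.replace ((c :: rest).drop 5) t [d0]))) =
              some (t', d') := by
            rw [pvFind_congr L _ (fun p => p.1.isPrefixOf (c :: rest)) (by
              intro p hp'
              have hp5 : p.1.length = 5 := pvFact_len1 _ (hL _ hp')
              rw [Bool.eq_iff_iff, pvPrefix5_iff _ _ hp5, pvPrefix5_iff _ _ hp5]
              have htk : (rest.take 4 ++
                  PySem.Chars.replace ((c :: rest).drop 5) t [d0]).take 4 = rest.take 4 :=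
                List.take_left' (by simp [List.length_take]; omega)
              rw [show (5 : Nat) = 4 + 1 from rfl, List.take_succ_cons, List.take_succ_cons, htk])]
            exact hfind
          have ht'shape : t' = c :: rest.take 4 := by
            rw [ht'eq, show (5 : Nat) = 4 + 1 from rfl, List.take_succ_cons]
          rw [hrep, ht'shape, List.cons_append,
            pvScanT_cons_some L c _ t' d' hcong, ht'5,
            show (5 - 1 : Nat) = 4 from rfl,
            List.drop_left' (l₁ := rest.take 4) (by simp [List.length_take]; omega),
            ih ((c :: rest).drop 5) (by simp only [List.length_drop]; omega)]
          have hfr : ((t, [d0]) :: L).find? (fun p => p.1.isPrefixOf (c :: rest)) =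
              some (t', d') := by
            simp only [List.find?, hpf]
            exact hfind
          rw [pvScanT_cons_some ((t, [d0]) :: L) c rest t' d' hfr, ht'5]
          rfl
        | none =>
          -- no token matches at this position: both sides copy one character
          rw [pvReplace_neg t [d0] c rest htne hpf]
          have hnone2 : L.find? (fun p => p.1.isPrefixOf
              (c :: PySem.Chars.replace rest t [d0])) = none := by
            rw [List.find?_eq_none]
            intro q hq hqpre
            have hq5 : q.1.length = 5 := pvFact_len1 q (hL q hq)
            by_cases hex : ∃ i, i < 4 ∧ t.isPrefixOf (rest.drop i) = true
            · -- t matches within the next 4 chars: the window would contain d0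
              have hspec := Nat.find_spec hex
              have hi0lt : Nat.find hex < 4 := hspec.1
              have hi0p : t.isPrefixOf (rest.drop (Nat.find hex)) = true := hspec.2
              have hmin : ∀ j < Nat.find hex, t.isPrefixOf (rest.drop j) = false := by
                intro j hj
                have hnm := Nat.find_min hex hj
                rw [Bool.eq_false_iff]
                exact fun hc => hnm ⟨by omega, hc⟩
              have hrep2 : PySem.Chars.replace rest t [d0] =
                  rest.take (Nat.find hex) ++ [d0] ++
                    PySem.Chars.replace (rest.drop (Nat.find hex + 5)) t [d0] := by
                have := pvReplace_at t [d0] htne (Nat.find hex) rest hmin hi0p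
                rw [this, ht5]
              have hi0len : Nat.find hex < rest.length := by
                by_contra hcon
                have hnil : rest.drop (Nat.find hex) = [] :=
                  List.drop_eq_nil_of_le (Nat.le_of_not_lt hcon)
                rw [hnil, List.isPrefixOf_iff_prefix] at hi0p
                exact htne (List.prefix_nil.mp hi0p)
              have helem : (c :: PySem.Chars.replace rest t [d0])[1 + Nat.find hex]? =
                  some d0 := by
                rw [hrep2, show (1 + Nat.find hex) = Nat.find hex + 1 from by omega,
                  List.getElem?_cons_succ, List.append_assoc,
                  List.getElem?_append_right (by simp [List.length_take])]
                simp only [List.length_take, Nat.min_eq_left (le_of_lt hi0len),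
                  Nat.sub_self, List.singleton_append, List.getElem?_cons_zero]
              have hqel : q.1[1 + Nat.find hex]? = some d0 := by
                rw [pvPrefix_getElem q.1 _ hq5 hqpre (1 + Nat.find hex) (by omega), helem]
              exact hd0 q (hL q hq) (List.mem_of_getElem? hqel)
            · -- t does not match in the next 4 chars: the window is unchanged from cs
              have hno4 : ∀ i < 4, t.isPrefixOf (rest.drop i) = false := by
                intro i hi
                rw [Bool.eq_false_iff]
                exact fun hc => hex ⟨i, hi, hc⟩
              have hskip : PySem.Chars.replace rest t [d0] =
                  rest.take 4 ++ PySem.Chars.replace (rest.drop 4) t [d0] :=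
                pvReplace_skip t [d0] htne 4 rest hno4
              have hq_eq : q.1 = (c :: rest).take 5 := by
                have h1 : q.1 = (c :: PySem.Chars.replace rest t [d0]).take 5 :=
                  (pvPrefix5_iff _ _ hq5).mp hqpre
                rw [h1, hskip, show (5 : Nat) = 4 + 1 from rfl,
                  List.take_succ_cons, List.take_succ_cons]
                congr 1
                by_cases h4 : 4 ≤ rest.length
                · exact List.take_left' (by simp [List.length_take]; omega)
                · have hd4 : rest.drop 4 = [] := List.drop_eq_nil_of_le (by omega)
                  rw [hd4, pvReplace_nil t [d0] htne, List.append_nil, List.take_take]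
                  simp
              rw [List.find?_eq_none] at hfind
              exact hfind q hq ((pvPrefix5_iff _ _ hq5).mpr hq_eq)
          rw [pvScanT_cons_none L _ _ hnone2, ih rest hlen]
          have hfr : ((t, [d0]) :: L).find? (fun p => p.1.isPrefixOf (c :: rest)) = none := by
            simp only [List.find?, hpf]
            exact hfind
          rw [pvScanT_cons_none ((t, [d0]) :: L) c rest hfr]

-- ---- A's foldl of replaces = scanner with the full table ----

lemma pvMain : ∀ (L : List (List Char × List Char)), (∀ p ∈ L, p ∈ pvToks) →
    ∀ cs, L.foldl (fun acc p => PySem.Chars.replace acc p.1 p.2) cs = pvScanT L cs := by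
  intro L
  induction L with
  | nil => intro _ cs; simp [pvScanT_empty]
  | cons hd tl ih =>
    intro hmem cs
    obtain ⟨t, d⟩ := hd
    simp only [List.foldl_cons]
    rw [ih (fun p hp => hmem p (by simp [hp])) (PySem.Chars.replace cs t d)]
    exact pvKey t d (hmem _ (by simp)) tl (fun p hp => hmem p (by simp [hp]))
      cs.length cs le_rfl

-- ---- B's arithmetic window decode = first prefix match in the table ----

-- pvDec decodes exactly the tokens of pvToks (on every hex-digit pair)
set_option maxRecDepth 8192 in
lemma pvDec_hex : (pvHexL.all fun h1 => pvHexL.all fun h2 =>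
    match pvDec ['u', '0', '0', h1, h2] with
    | some c => decide ((['u', '0', '0', h1, h2], [c]) ∈ pvToks)
    | none => true) = true := by decide

set_option maxRecDepth 4096 in
lemma pvDec_tok : ∀ p ∈ pvToks, (pvDec p.1).map (fun c => [c]) = some p.2 := by decide

lemma pvDec_mem : ∀ (w : List Char) (c : Char), pvDec w = some c → (w, [c]) ∈ pvToks := by
  intro w c h
  unfold pvDec at h
  split at h
  case h_2 => exact absurd h (by simp)
  case h_1 h1 h2 =>
    split_ifs at h with hm
    have key := pvDec_hex
    simp only [List.all_eq_true] at key
    have k2 := key h1 hm.1 h2 hm.2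
    have hval : pvDec ['u', '0', '0', h1, h2] = some c := by
      simpa [pvDec, hm] using h
    rw [hval] at k2
    simpa using k2

lemma pvKeysNodup : (pvToks.map Prod.fst).Nodup := by decide

lemma pvFind_key : ∀ (L : List (List Char × List Char)), (L.map Prod.fst).Nodup →
    ∀ (k v : List Char), (k, v) ∈ L →
      L.find? (fun p => decide (p.1 = k)) = some (k, v) := by
  intro L
  induction L with
  | nil => intro _ k v hm; simp at hm
  | cons a L ih =>
    intro hnd k v hm
    obtain ⟨a1, a2⟩ := a
    simp only [List.map_cons, List.nodup_cons] at hnd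
    by_cases he : a1 = k
    · subst he
      rcases List.mem_cons.mp hm with heq | htl
      · rw [List.find?_cons_of_pos (by simp)]
        exact congrArg some heq.symm
      · exact absurd (List.mem_map.mpr ⟨(a1, v), htl, rfl⟩) hnd.1
    · rw [List.find?_cons_of_neg (by simp [he])]
      rcases List.mem_cons.mp hm with heq | htl
      · exact absurd (congrArg Prod.fst heq).symm he
      · exact ih hnd.2 k v htl

-- the find? predicate, restricted to pvToks, is "key = window"
lemma pvFind_window (l : List Char) :
    pvToks.find? (fun p => p.1.isPrefixOf l) =
      pvToks.find? (fun p => decide (p.1 = l.take 5)) := by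
  apply pvFind_congr
  intro p hp
  rw [Bool.eq_iff_iff, pvPrefix5_iff _ _ (pvFact_len1 p hp)]
  simp

-- ---- B's scan = scanner with the full table ----

lemma pvScanB_nil : pvScanB [] = [] := by rw [pvScanB]

lemma pvScanB_cons_some (c : Char) (rest : List Char) (d : Char)
    (h : pvDec (List.take 5 (c :: rest)) = some d) :
    pvScanB (c :: rest) = d :: pvScanB (rest.drop 4) := by
  rw [pvScanB, h]

lemma pvScanB_cons_none (c : Char) (rest : List Char)
    (h : pvDec (List.take 5 (c :: rest)) = none) :
    pvScanB (c :: rest) = c :: pvScanB rest := by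
  rw [pvScanB, h]

lemma pvScanB_eq : ∀ (n : Nat) (cs : List Char), cs.length ≤ n →
    pvScanB cs = pvScanT pvToks cs := by
  intro n
  induction n with
  | zero =>
    intro cs h
    have : cs = [] := by cases cs <;> simp_all
    subst this
    rw [pvScanB_nil, pvScanT_nil]
  | succ n ih =>
    intro cs hcs
    cases cs with
    | nil => rw [pvScanB_nil, pvScanT_nil]
    | cons c rest =>
      cases hdec : pvDec (List.take 5 (c :: rest)) with
      | some d =>
        have hmem : ((c :: rest).take 5, [d]) ∈ pvToks := pvDec_mem _ _ hdec
        have hfind : pvToks.find? (fun p => p.1.isPrefixOf (c :: rest)) =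
            some ((c :: rest).take 5, [d]) := by
          rw [pvFind_window]
          exact pvFind_key pvToks pvKeysNodup _ _ hmem
        have hlen5 : ((c :: rest).take 5).length = 5 := pvFact_len1 _ hmem
        rw [pvScanB_cons_some c rest d hdec,
          pvScanT_cons_some pvToks c rest _ _ hfind, hlen5,
          ih (rest.drop 4) (by
            simp only [List.length_cons] at hcs
            simp only [List.length_drop]; omega)]
        rfl
      | none =>
        have hfind : pvToks.find? (fun p => p.1.isPrefixOf (c :: rest)) = none := by
          rw [pvFind_window, List.find?_eq_none]
          intro p hp hpred
          have hk : p.1 = (c :: rest).take 5 := by simpa using hpred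
          have := pvDec_tok p hp
          rw [hk, hdec] at this
          simp at this
        rw [pvScanB_cons_none c rest hdec,
          pvScanT_cons_none pvToks c rest hfind, ih rest (by simpa using hcs)]

-- ---- assembly ----

lemma pvFoldl_toList : ∀ (ps : List (String × String)) (s0 : String),
    (ps.foldl (fun acc p => PySem.Str.replace acc p.1 p.2) s0).toList =
      (ps.map (fun p => (p.1.toList, p.2.toList))).foldl
        (fun cs p => PySem.Chars.replace cs p.1 p.2) s0.toList := by
  intro ps
  induction ps with
  | nil => intro s0; simp
  | cons a ps ih =>
    intro s0
    simp only [List.foldl_cons, List.map_cons, ih, PySem.Str.toList_replace]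

set_option maxRecDepth 100000 in
lemma pvItems_map :
    replacements.items.map (fun p => (p.1.toList, p.2.toList)) = pvToks := by decide

-- ===== VERDICT (by name: the statement is the Claim_ definition above) =====
theorem clean_source_url_spec : Claim_equal_clean_source_url := by
  unfold Claim_equal_clean_source_url Spec_clean_source_url
  intro s _
  show clean_source_url s = clean_source_url_alt s
  simp only [clean_source_url, clean_source_url_alt]
  have h : (List.foldl (fun acc p => PySem.Str.replace acc p.1 p.2)
      (PySem.Str.replace s "\\\\" "") replacements.items).toList =
      pvScanB (PySem.Str.replace s "\\\\" "").toList := by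
    rw [pvFoldl_toList, pvItems_map, pvMain pvToks (fun _ hp => hp)]
    exact (pvScanB_eq _ _ le_rfl).symm
  calc List.foldl (fun acc p => PySem.Str.replace acc p.1 p.2)
        (PySem.Str.replace s "\\\\" "") replacements.items
      = String.ofList (List.foldl (fun acc p => PySem.Str.replace acc p.1 p.2)
          (PySem.Str.replace s "\\\\" "") replacements.items).toList :=
        (String.ofList_toList).symm
    _ = String.ofList (pvScanB (PySem.Str.replace s "\\\\" "").toList) := by rw [h]
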